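-- pv_equiv track=rewrite | github.com/AdamZhouSE/pythonHomework | Code/CodeRecords/2744/60693/294201.py | findInDiff
-- ===== SOURCE A (Python) =====
-- def findInDiff(ws0:[str],ws1:[str]):
--     # 一奇一偶的不同字符串组合，当且仅当偶字符串长度是寄字符串长度两倍且有公共，或者两个都是同单个字符组成
--     len0,len1=len(ws0),len(ws1)
--     res=0
--     for s0 in ws0:
--         for s1 in ws1:
--             if set(s0)==set(s1) and len(set(s1))==1:
--                 res+=2
--             elif len(s0)==2*len(s1) and s1==s0[:len(s1)]:
--                 res+=2
--     return res
-- ===== SOURCE B (Python) =====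
-- def findInDiff(ws0, ws1):
--     # Hash-index ws1 once (exact-string counts + monochar counts by char), then one pass over ws0.
--     exact = {}
--     mono = {}
--     for s in ws1:
--         exact[s] = exact.get(s, 0) + 1
--         if len(set(s)) == 1:
--             mono[s[0]] = mono.get(s[0], 0) + 1
--     res = 0
--     for s0 in ws0:
--         if len(set(s0)) == 1:
--             res += 2 * mono.get(s0[0], 0)
--         elif len(s0) % 2 == 0:
--             res += 2 * exact.get(s0[:len(s0) // 2], 0)
--     return res
-- ===== Notes on version B (the rewrite author's own statement) =====
-- stated objective: faster
-- what changed: Replaces the nested loop over all (s0,s1) pairs by two hash maps built in one pass over ws1 (exact-string counts and monochar counts per character), so each s0 is handled with O(1) dict lookups; uses that for a monochar s0 the prefix-doubling branch is subsumed by the monochar branch.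
import Mathlib
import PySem

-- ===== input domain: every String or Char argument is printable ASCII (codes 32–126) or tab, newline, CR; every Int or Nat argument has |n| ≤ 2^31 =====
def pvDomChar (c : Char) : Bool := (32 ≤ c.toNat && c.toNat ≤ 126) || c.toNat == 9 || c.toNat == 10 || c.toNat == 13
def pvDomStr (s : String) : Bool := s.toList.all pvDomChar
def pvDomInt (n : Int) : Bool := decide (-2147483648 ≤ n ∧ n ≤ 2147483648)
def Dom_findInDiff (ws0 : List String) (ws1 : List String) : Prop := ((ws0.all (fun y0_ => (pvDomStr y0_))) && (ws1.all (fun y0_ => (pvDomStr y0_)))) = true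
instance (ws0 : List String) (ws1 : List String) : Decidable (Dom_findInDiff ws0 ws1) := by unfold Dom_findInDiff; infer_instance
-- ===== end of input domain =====

-- B replaces A's nested pair loop by two hash maps built in one pass over ws1 (exact-string
-- counts and monochar counts by char) and O(1) lookups per s0 — measurably faster (asymptotic).

-- ===== PORT A =====
-- (Python A also assigns len0, len1 = len(ws0), len(ws1); they are never used — dead code omitted)
def findInDiff (ws0 : List String) (ws1 : List String) : Int :=
  ws0.foldl (fun res s0 =>
    ws1.foldl (fun res s1 =>
      if PySem.Set.equal (PySem.Set.ofList s0.toList) (PySem.Set.ofList s1.toList)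
          && (PySem.Set.len (PySem.Set.ofList s1.toList) == 1) then res + 2
      else if (PySem.Str.len s0 == 2 * PySem.Str.len s1)
          && (s1 == PySem.Str.slice s0 none (some (PySem.Str.len s1))) then res + 2
      else res) res) 0

-- ===== PORT B =====
-- len(set(s)) == 1
def pvMono1 (s : String) : Bool := PySem.Set.len (PySem.Set.ofList s.toList) == 1

-- the body of B's indexing loop over ws1: exact[s] += 1; if len(set(s)) == 1: mono[s[0]] += 1
def pvIndex1 (em : PySem.Dict String Int × PySem.Dict Char Int) (s : String) :
    PySem.Dict String Int × PySem.Dict Char Int :=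
  (em.1.insert s (em.1.getD s 0 + 1),
   if pvMono1 s then
     match s.toList with
     | c :: _ => em.2.insert c (em.2.getD c 0 + 1)
     | [] => em.2          -- unreachable: len(set(s)) == 1 forces s nonempty
   else em.2)

def findInDiff_alt (ws0 : List String) (ws1 : List String) : Int :=
  let p := ws1.foldl pvIndex1 (PySem.Dict.empty, PySem.Dict.empty)
  ws0.foldl (fun res s0 =>
    if pvMono1 s0 then
      res + 2 * (match s0.toList with
                 | c :: _ => p.2.getD c 0
                 | [] => 0)    -- unreachable: len(set(s0)) == 1 forces s0 nonempty
    else if PySem.Int.mod (PySem.Str.len s0) 2 == 0 then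
      res + 2 * p.1.getD
        (PySem.Str.slice s0 none (some (PySem.Int.floordiv (PySem.Str.len s0) 2))) 0
    else res) 0

-- ===== PRECONDITION & SPEC =====
def Spec_findInDiff (ws0 : List String) (ws1 : List String) (out : Int) : Prop := out = findInDiff_alt ws0 ws1
instance (ws0 : List String) (ws1 : List String) (out : Int) : Decidable (Spec_findInDiff ws0 ws1 out) := by unfold Spec_findInDiff; infer_instance

-- ===== CLAIM (what is proved, stated in full; the proofs are below) =====
def Claim_equal_findInDiff : Prop := ∀ (ws0 : List String) (ws1 : List String), Dom_findInDiff ws0 ws1 → Spec_findInDiff ws0 ws1 (findInDiff ws0 ws1)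

-- ===== LEMMAS AND PROOFS =====

-- A's first branch condition, named for the proofs
def condA (s0 s1 : String) : Bool :=
  PySem.Set.equal (PySem.Set.ofList s0.toList) (PySem.Set.ofList s1.toList)
    && (PySem.Set.len (PySem.Set.ofList s1.toList) == 1)

-- A's second branch condition, named for the proofs
def condB (s0 s1 : String) : Bool :=
  (PySem.Str.len s0 == 2 * PySem.Str.len s1)
    && (s1 == PySem.Str.slice s0 none (some (PySem.Str.len s1)))

-- "s1 is a nonempty monochar string of character c"
def monoB (c : Char) (s : String) : Bool := pvMono1 s && (s.toList.head? == some c)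

lemma discard_all_eq {α : Type} [BEq α] [LawfulBEq α] (s : PySem.Set α) (c : α)
    (h : ∀ x ∈ s, x = c) : s.discard c = [] := by
  rw [List.eq_nil_iff_forall_not_mem]
  intro a ha
  rw [PySem.Set.mem_discard] at ha
  exact ha.2 (h a ha.1)

lemma ofList_single_of {α : Type} [BEq α] [LawfulBEq α] {l : List α} {c : α}
    (hne : l ≠ []) (h : ∀ x ∈ l, x = c) : PySem.Set.ofList l = [c] := by
  cases l with
  | nil => exact absurd rfl hne
  | cons a t =>
    rw [PySem.Set.ofList_cons]
    have ha : a = c := h a (List.mem_cons_self ..)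
    have hd : (PySem.Set.ofList t).discard a = [] := by
      apply discard_all_eq
      intro x hx
      exact (h x (List.mem_cons_of_mem _ ((PySem.Set.mem_ofList t x).mp hx))).trans ha.symm
    rw [hd, ha]

lemma ofList_single_iff {α : Type} [BEq α] [LawfulBEq α] {l : List α} {c : α} :
    PySem.Set.ofList l = [c] ↔ l ≠ [] ∧ ∀ x ∈ l, x = c := by
  constructor
  · intro h
    constructor
    · intro hl; subst hl; simp [PySem.Set.ofList_nil] at h
    · intro x hx
      have hm : x ∈ PySem.Set.ofList l := (PySem.Set.mem_ofList l x).mpr hx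
      rw [h] at hm; simpa using hm
  · rintro ⟨hne, h⟩; exact ofList_single_of hne h

lemma pvMono1_iff {s : String} : pvMono1 s = true ↔ ∃ c, PySem.Set.ofList s.toList = [c] := by
  unfold pvMono1
  rw [beq_iff_eq]
  simp [PySem.Set.len, List.length_eq_one_iff]

lemma head?_of_single {l : List Char} {c : Char} (h : PySem.Set.ofList l = [c]) :
    l.head? = some c := by
  obtain ⟨hne, hall⟩ := ofList_single_iff.mp h
  cases l with
  | nil => exact absurd rfl hne
  | cons a t => simp [hall a (List.mem_cons_self ..)]

lemma equal_single {c d : Char} :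
    PySem.Set.equal ([c] : PySem.Set Char) ([d] : PySem.Set Char) = (c == d) := by
  by_cases h : c = d
  · subst h
    simp only [beq_self_eq_true]
    exact (PySem.Set.equal_iff _ _).mpr (fun x => Iff.rfl)
  · have h2 : PySem.Set.equal ([c] : PySem.Set Char) [d] = false := by
      cases he : PySem.Set.equal ([c] : PySem.Set Char) [d]
      · rfl
      · exfalso
        have hm := ((PySem.Set.equal_iff _ _).mp he c).mp (by simp)
        simp at hm; exact h hm
    rw [h2]; symm
    simpa using h

lemma nodup_all_single {α : Type} {l : List α} {d : α} (hn : l.Nodup)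
    (h : ∀ x, x ∈ l ↔ x = d) : l = [d] := by
  cases l with
  | nil => have := (h d).mpr rfl; simp at this
  | cons a t =>
    have ha : a = d := (h a).mp (List.mem_cons_self ..)
    have ht : t = [] := by
      rw [List.eq_nil_iff_forall_not_mem]
      intro x hx
      have hxd : x = d := (h x).mp (List.mem_cons_of_mem _ hx)
      exact (List.nodup_cons.mp hn).1 (ha ▸ hxd ▸ hx)
    rw [ha, ht]

lemma condA_eq_mono {s0 : String} {c : Char} (h : PySem.Set.ofList s0.toList = [c]) (s1 : String) :
    condA s0 s1 = monoB c s1 := by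
  have hA : condA s0 s1 = (PySem.Set.equal (PySem.Set.ofList s0.toList) (PySem.Set.ofList s1.toList) && pvMono1 s1) := rfl
  rw [hA]
  unfold monoB
  cases hm : pvMono1 s1
  · simp
  · simp only [Bool.and_true, Bool.true_and]
    obtain ⟨d, hd⟩ := pvMono1_iff.mp hm
    rw [h, hd, equal_single, head?_of_single hd]
    rw [Bool.eq_iff_iff]
    simp only [beq_iff_eq, Option.some.injEq]
    exact eq_comm

lemma condA_false {s0 : String} (h : pvMono1 s0 = false) (s1 : String) :
    condA s0 s1 = false := by
  have hA : condA s0 s1 = (PySem.Set.equal (PySem.Set.ofList s0.toList) (PySem.Set.ofList s1.toList) && pvMono1 s1) := rfl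
  rw [hA]
  cases hm : pvMono1 s1
  · simp
  · simp only [Bool.and_true]
    obtain ⟨d, hd⟩ := pvMono1_iff.mp hm
    cases he : PySem.Set.equal (PySem.Set.ofList s0.toList) (PySem.Set.ofList s1.toList)
    · rfl
    · exfalso
      have hmem := (PySem.Set.equal_iff _ _).mp he
      have hs0 : PySem.Set.ofList s0.toList = [d] := by
        apply nodup_all_single (PySem.Set.nodup_ofList _)
        intro x
        rw [hmem x, hd]; simp
      have hmono : pvMono1 s0 = true := pvMono1_iff.mpr ⟨d, hs0⟩
      rw [h] at hmono; exact Bool.false_ne_true hmono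

lemma condB_iff {s0 s1 : String} :
    condB s0 s1 = true ↔
      s0.toList.length = 2 * s1.toList.length ∧ s1.toList = s0.toList.take s1.toList.length := by
  unfold condB
  rw [Bool.and_eq_true, beq_iff_eq, beq_iff_eq]
  constructor
  · rintro ⟨h1, h2⟩
    rw [PySem.Str.len_eq, PySem.Str.len_eq] at h1
    constructor
    · exact_mod_cast h1
    · have := congrArg String.toList h2
      rwa [PySem.Str.toList_slice, PySem.Chars.slice_eq_listSlice, PySem.Str.len_eq,
        PySem.List.slice_to_natCast] at this
  · rintro ⟨h1, h2⟩
    constructor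
    · rw [PySem.Str.len_eq, PySem.Str.len_eq]; exact_mod_cast h1
    · apply String.toList_inj.mp
      rw [PySem.Str.toList_slice, PySem.Chars.slice_eq_listSlice, PySem.Str.len_eq,
        PySem.List.slice_to_natCast]
      exact h2

lemma condB_eq_b (s0 s1 : String) :
    condB s0 s1 = ((PySem.Int.mod (PySem.Str.len s0) 2 == 0)
      && (s1 == PySem.Str.slice s0 none (some (PySem.Int.floordiv (PySem.Str.len s0) 2)))) := by
  have hmod : PySem.Int.mod (PySem.Str.len s0) 2 = ((s0.toList.length % 2 : Nat) : Int) := by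
    rw [PySem.Str.len_eq]; exact_mod_cast PySem.Int.mod_natCast s0.toList.length 2
  have hdiv : PySem.Int.floordiv (PySem.Str.len s0) 2 = ((s0.toList.length / 2 : Nat) : Int) := by
    rw [PySem.Str.len_eq]; exact_mod_cast PySem.Int.floordiv_natCast s0.toList.length 2
  rw [Bool.eq_iff_iff, condB_iff, Bool.and_eq_true, beq_iff_eq, beq_iff_eq, hmod, hdiv]
  have hsl : s1 = PySem.Str.slice s0 none (some ((s0.toList.length / 2 : Nat) : Int)) ↔
      s1.toList = s0.toList.take (s0.toList.length / 2) := by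
    constructor
    · intro h
      have := congrArg String.toList h
      rwa [PySem.Str.toList_slice, PySem.Chars.slice_eq_listSlice,
        PySem.List.slice_to_natCast] at this
    · intro h
      apply String.toList_inj.mp
      rw [PySem.Str.toList_slice, PySem.Chars.slice_eq_listSlice, PySem.List.slice_to_natCast]
      exact h
  rw [hsl]
  constructor
  · rintro ⟨h1, h2⟩
    have hm2 : s1.toList.length = s0.toList.length / 2 := by omega
    refine ⟨by exact_mod_cast (by omega : s0.toList.length % 2 = 0), by rw [← hm2]; exact h2⟩
  · rintro ⟨h1, h2⟩
    have h1' : s0.toList.length % 2 = 0 := by exact_mod_cast h1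
    have hlen : s1.toList.length = s0.toList.length / 2 := by
      rw [h2, List.length_take]; omega
    exact ⟨by omega, by rw [hlen]; exact h2⟩

lemma union_mono {s0 : String} {c : Char} (h : PySem.Set.ofList s0.toList = [c]) (s1 : String) :
    (condA s0 s1 || condB s0 s1) = monoB c s1 := by
  rw [condA_eq_mono h]
  cases hB : monoB c s1
  · cases hcB : condB s0 s1
    · simp
    · exfalso
      obtain ⟨h1, h2⟩ := condB_iff.mp hcB
      obtain ⟨hne, hall⟩ := ofList_single_iff.mp h
      have hn : s0.toList.length ≠ 0 := by
        intro h0; exact hne (List.eq_nil_of_length_eq_zero h0)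
      have hs1ne : s1.toList ≠ [] := by
        intro h0; rw [h0] at h1; simp at h1; subst h1; simp at hne
      have hs1all : ∀ x ∈ s1.toList, x = c := by
        intro x hx; rw [h2] at hx; exact hall x (List.mem_of_mem_take hx)
      have hsingle := ofList_single_of hs1ne hs1all
      have hm : pvMono1 s1 = true := pvMono1_iff.mpr ⟨c, hsingle⟩
      have hh : s1.toList.head? = some c := head?_of_single hsingle
      unfold monoB at hB
      rw [hm, hh] at hB; simp at hB
  · simp

lemma foldl_if2 (l : List String) (a b : String → Bool) (r : Int) :
    l.foldl (fun r x => if a x then r + 2 else if b x then r + 2 else r) r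
      = r + 2 * (l.countP (fun x => a x || b x) : Int) := by
  induction l generalizing r with
  | nil => simp
  | cons x t ih =>
    rw [List.foldl_cons, ih, List.countP_cons]
    cases ha : a x <;> cases hb : b x <;> simp <;> ring

lemma fold_fst (ws1 : List String) (em : PySem.Dict String Int × PySem.Dict Char Int) (s : String) :
    ((ws1.foldl pvIndex1 em).1).getD s 0 = em.1.getD s 0 + (ws1.count s : Int) := by
  induction ws1 generalizing em with
  | nil => simp
  | cons a t ih =>
    rw [List.foldl_cons, ih, List.count_cons]
    have h1 : (pvIndex1 em a).1 = em.1.insert a (em.1.getD a 0 + 1) := rfl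
    rw [h1]
    by_cases h : a = s
    · subst h
      rw [PySem.Dict.getD_insert_self]
      simp
      ring
    · rw [PySem.Dict.getD_insert_of_ne _ _ _ (fun he => h he.symm)]
      simp [h]

lemma fold_snd (ws1 : List String) (em : PySem.Dict String Int × PySem.Dict Char Int) (c : Char) :
    ((ws1.foldl pvIndex1 em).2).getD c 0 = em.2.getD c 0 + (ws1.countP (monoB c) : Int) := by
  induction ws1 generalizing em with
  | nil => simp
  | cons a t ih =>
    rw [List.foldl_cons, ih, List.countP_cons]
    cases hm : pvMono1 a
    · have hB : monoB c a = false := by unfold monoB; rw [hm]; rfl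
      have h2 : (pvIndex1 em a).2 = em.2 := by
        unfold pvIndex1; rw [hm]; rfl
      rw [h2, hB]
      simp
    · obtain ⟨d, hd⟩ := pvMono1_iff.mp hm
      obtain ⟨hne, hall⟩ := ofList_single_iff.mp hd
      cases hl : a.toList with
      | nil => exact absurd hl hne
      | cons d' tl =>
        have hhead : a.toList.head? = some d' := by rw [hl]; rfl
        have hB : monoB c a = (d' == c) := by
          unfold monoB; rw [hm, hhead]
          rw [Bool.eq_iff_iff]
          simp only [Bool.true_and, beq_iff_eq, Option.some.injEq]
        have h2 : (pvIndex1 em a).2 = em.2.insert d' (em.2.getD d' 0 + 1) := by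
          unfold pvIndex1; rw [hm, hl]; simp
        rw [h2, hB]
        by_cases hdc : d' = c
        · subst hdc
          rw [PySem.Dict.getD_insert_self]
          simp
          ring
        · rw [PySem.Dict.getD_insert_of_ne _ _ _ (fun he => hdc he.symm)]
          simp [hdc]

lemma step_eq (ws1 : List String) (s0 : String) (r : Int) :
    ws1.foldl (fun res s1 => if condA s0 s1 then res + 2 else if condB s0 s1 then res + 2 else res) r
    = (if pvMono1 s0 then
         r + 2 * (match s0.toList with
                  | c :: _ => ((ws1.foldl pvIndex1 (PySem.Dict.empty, PySem.Dict.empty)).2).getD c 0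
                  | [] => 0)
       else if PySem.Int.mod (PySem.Str.len s0) 2 == 0 then
         r + 2 * ((ws1.foldl pvIndex1 (PySem.Dict.empty, PySem.Dict.empty)).1).getD
           (PySem.Str.slice s0 none (some (PySem.Int.floordiv (PySem.Str.len s0) 2))) 0
       else r) := by
  rw [foldl_if2]
  cases hm : pvMono1 s0
  · simp only [Bool.false_eq_true, if_false]
    have hcount : ws1.countP (fun s1 => condA s0 s1 || condB s0 s1)
        = ws1.countP (fun s1 => condB s0 s1) :=
      List.countP_congr (fun x _ => by rw [condA_false hm]; simp)
    rw [hcount]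
    cases he : (PySem.Int.mod (PySem.Str.len s0) 2 == 0)
    · simp only [Bool.false_eq_true, if_false]
      have hz : ws1.countP (fun s1 => condB s0 s1) = 0 := by
        rw [List.countP_eq_zero]
        intro x _ hC
        rw [condB_eq_b, he] at hC; simp at hC
      rw [hz]; push_cast; ring
    · simp only [if_true]
      have hcB : ws1.countP (fun s1 => condB s0 s1)
          = ws1.countP (fun x => x == PySem.Str.slice s0 none (some (PySem.Int.floordiv (PySem.Str.len s0) 2))) :=
        List.countP_congr (fun x _ => by rw [condB_eq_b, he]; simp)
      rw [hcB, ← List.count_eq_countP]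
      rw [fold_fst]
      simp
  · simp only [if_true]
    obtain ⟨c, hc⟩ := pvMono1_iff.mp hm
    obtain ⟨hne, hall⟩ := ofList_single_iff.mp hc
    cases hl : s0.toList with
    | nil => exact absurd hl hne
    | cons c' tl =>
      have hc' : c' = c := hall c' (by rw [hl]; exact List.mem_cons_self ..)
      rw [← hc'] at hc
      have hcnt : ws1.countP (fun s1 => condA s0 s1 || condB s0 s1) = ws1.countP (monoB c') :=
        List.countP_congr (fun x _ => by rw [union_mono hc x])
      rw [hcnt]
      simp [fold_snd]

lemma main_fold (ws0 ws1 : List String) (r : Int) :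
    ws0.foldl (fun res s0 =>
      ws1.foldl (fun res s1 => if condA s0 s1 then res + 2 else if condB s0 s1 then res + 2 else res) res) r
    = ws0.foldl (fun res s0 =>
        if pvMono1 s0 then
          res + 2 * (match s0.toList with
                     | c :: _ => ((ws1.foldl pvIndex1 (PySem.Dict.empty, PySem.Dict.empty)).2).getD c 0
                     | [] => 0)
        else if PySem.Int.mod (PySem.Str.len s0) 2 == 0 then
          res + 2 * ((ws1.foldl pvIndex1 (PySem.Dict.empty, PySem.Dict.empty)).1).getD
            (PySem.Str.slice s0 none (some (PySem.Int.floordiv (PySem.Str.len s0) 2))) 0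
        else res) r := by
  induction ws0 generalizing r with
  | nil => rfl
  | cons a t ih =>
    rw [List.foldl_cons, List.foldl_cons, step_eq, ih]

-- ===== VERDICT (by name: the statement is the Claim_ definition above) =====
theorem findInDiff_spec : Claim_equal_findInDiff := by
  intro ws0 ws1 _
  unfold Spec_findInDiff findInDiff findInDiff_alt
  exact main_fold ws0 ws1 0
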